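-- pv_equiv track=rewrite | github.com/huubexel/networkx | main.py | nodes_size
-- ===== SOURCE A (Python) =====
-- def nodes_size(importance_list):
--     final_list = []
--     for importance in importance_list:
--         if importance == "#9600FF" or importance == "#0CFF14":
--             size = 300
--         elif importance == "#BC5EFF" or importance == "#66FF6B":
--             size = 220
--         elif importance == "#D294FF" or importance == "#A3FFA6":
--             size = 150
--         else:
--             size = 60
--         final_list.append(size)
--
--     return final_list
-- ===== SOURCE B (Python) =====
-- def nodes_size(importance_list):
--     # Start with every node at the default size, then run one overwrite
--     # pass per importance tier, repainting the matching positions.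
--     sizes = [60] * len(importance_list)
--     tiers = (
--         (300, ("#9600FF", "#0CFF14")),
--         (220, ("#BC5EFF", "#66FF6B")),
--         (150, ("#D294FF", "#A3FFA6")),
--     )
--     for size, colors in tiers:
--         sizes = [size if importance in colors else current
--                  for importance, current in zip(importance_list, sizes)]
--     return sizes
-- ===== Notes on version B (the rewrite author's own statement) =====
-- stated objective: alternative
-- what changed: Instead of one pass with an if/elif cascade per element, B initialises all sizes to the default 60 and then makes three staged overwrite passes, one per importance tier, repainting positions whose color belongs to that tier.
import Mathlib
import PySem

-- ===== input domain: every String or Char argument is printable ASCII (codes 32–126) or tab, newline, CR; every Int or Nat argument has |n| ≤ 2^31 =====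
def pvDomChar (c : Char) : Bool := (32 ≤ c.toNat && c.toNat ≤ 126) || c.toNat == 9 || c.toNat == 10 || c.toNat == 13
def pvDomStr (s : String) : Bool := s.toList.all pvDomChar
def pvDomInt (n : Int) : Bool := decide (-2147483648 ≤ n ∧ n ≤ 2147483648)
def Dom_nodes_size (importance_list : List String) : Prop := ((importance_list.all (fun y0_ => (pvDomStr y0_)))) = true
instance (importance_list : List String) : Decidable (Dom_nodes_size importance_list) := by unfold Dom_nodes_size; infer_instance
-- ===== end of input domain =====

-- B replaces A's single-pass if/elif cascade by an all-default list followed by three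
-- staged overwrite passes, one per importance tier (objective: alternative).

-- ===== PORT A =====
-- A's loop appending a size chosen by an if/elif chain, as a fold over the same state.
def nodes_size (importance_list : List String) : List Int :=
  importance_list.foldl
    (fun final_list importance =>
      let size : Int :=
        if importance == "#9600FF" || importance == "#0CFF14" then 300
        else if importance == "#BC5EFF" || importance == "#66FF6B" then 220
        else if importance == "#D294FF" || importance == "#A3FFA6" then 150
        else 60
      final_list ++ [size])
    []

-- ===== PORT B =====
-- Source B: sizes starts as [60]*len, then a fold over the tier table rebuilds sizes by a
-- zip comprehension that repaints positions whose color is in the current tier.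
def nodes_size_alt (importance_list : List String) : List Int :=
  [((300 : Int), ["#9600FF", "#0CFF14"]),
   ((220 : Int), ["#BC5EFF", "#66FF6B"]),
   ((150 : Int), ["#D294FF", "#A3FFA6"])].foldl
    (fun sizes tier =>
      (importance_list.zip sizes).map
        (fun p => if tier.2.contains p.1 then tier.1 else p.2))
    (List.replicate importance_list.length 60)

-- ===== PRECONDITION & SPEC =====
def Spec_nodes_size (importance_list : List String) (out : List Int) : Prop := out = nodes_size_alt importance_list
instance (importance_list : List String) (out : List Int) : Decidable (Spec_nodes_size importance_list out) := by unfold Spec_nodes_size; infer_instance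

-- ===== CLAIM (what is proved, stated in full; the proofs are below) =====
def Claim_equal_nodes_size : Prop := ∀ (importance_list : List String), Dom_nodes_size importance_list → Spec_nodes_size importance_list (nodes_size importance_list)

-- ===== LEMMAS AND PROOFS =====

-- A's fold with an arbitrary accumulator equals a map of the cascade.
theorem nodes_size_fold (l : List String) (acc : List Int) :
    l.foldl
      (fun final_list importance =>
        let size : Int :=
          if importance == "#9600FF" || importance == "#0CFF14" then 300
          else if importance == "#BC5EFF" || importance == "#66FF6B" then 220
          else if importance == "#D294FF" || importance == "#A3FFA6" then 150
          else 60
        final_list ++ [size]) acc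
    = acc ++ l.map (fun s =>
        if s == "#9600FF" || s == "#0CFF14" then (300:Int)
        else if s == "#BC5EFF" || s == "#66FF6B" then 220
        else if s == "#D294FF" || s == "#A3FFA6" then 150
        else 60) := by
  induction l generalizing acc with
  | nil => simp
  | cons x xs ih => rw [List.foldl_cons, ih]; simp

-- the repaint chain applied to one element equals A's cascade
theorem nodes_size_head (x : String) :
    (if ["#D294FF", "#A3FFA6"].contains x then (150:Int)
     else if ["#BC5EFF", "#66FF6B"].contains x then 220
     else if ["#9600FF", "#0CFF14"].contains x then 300
     else 60)
    = (if x == "#9600FF" || x == "#0CFF14" then (300:Int)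
       else if x == "#BC5EFF" || x == "#66FF6B" then 220
       else if x == "#D294FF" || x == "#A3FFA6" then 150
       else 60) := by
  by_cases h1 : x = "#9600FF"
  · subst h1; decide
  by_cases h2 : x = "#0CFF14"
  · subst h2; decide
  by_cases h3 : x = "#BC5EFF"
  · subst h3; decide
  by_cases h4 : x = "#66FF6B"
  · subst h4; decide
  by_cases h5 : x = "#D294FF"
  · subst h5; decide
  by_cases h6 : x = "#A3FFA6"
  · subst h6; decide
  simp [
    beq_eq_false_iff_ne.mpr h1, beq_eq_false_iff_ne.mpr h2, beq_eq_false_iff_ne.mpr h3,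
    beq_eq_false_iff_ne.mpr h4, beq_eq_false_iff_ne.mpr h5, beq_eq_false_iff_ne.mpr h6, h1, h2, h3, h4, h5, h6]

-- B's three staged passes, element by element, equal the cascade map.
theorem nodes_size_alt_eq_map (l : List String) :
    nodes_size_alt l
    = l.map (fun s =>
        if s == "#9600FF" || s == "#0CFF14" then (300:Int)
        else if s == "#BC5EFF" || s == "#66FF6B" then 220
        else if s == "#D294FF" || s == "#A3FFA6" then 150
        else 60) := by
  induction l with
  | nil => rfl
  | cons x xs ih =>
    simp only [nodes_size_alt, List.foldl_cons, List.foldl_nil, List.length_cons,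
      List.replicate_succ, List.zip_cons_cons, List.map_cons] at ih ⊢
    rw [ih, nodes_size_head]

-- ===== VERDICT (by name: the statement is the Claim_ definition above) =====
theorem nodes_size_spec : Claim_equal_nodes_size := by
  intro l _
  unfold Spec_nodes_size nodes_size
  rw [nodes_size_fold, List.nil_append, nodes_size_alt_eq_map]
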